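-- pv_equiv track=rewrite | github.com/TomLi515/Campus_Life_Coach | pretrain/src/pretrain/data/pamap2.py | _map_activity
-- ===== SOURCE A (Python) =====
-- from typing import Any, Dict, List, Mapping, Sequence, Tuple
--
-- def _map_activity(raw_label: str, mapping: Mapping[str, Sequence[str]], labels: Sequence[str]) -> str | None:
--     normalized = raw_label.lower()
--     for target_label, source_labels in mapping.items():
--         if normalized in [s.lower() for s in source_labels]:
--             return target_label
--     if "Other" in labels:
--         return "Other"
--     return None
-- ===== SOURCE B (Python) =====
-- def _map_activity(raw_label, mapping, labels):
--     pairs = [(s.lower(), t) for t, srcs in mapping.items() for s in srcs]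
--     index = dict(reversed(pairs))  # reversed so the FIRST pair wins after overwrites
--     default = "Other" if "Other" in labels else None
--     return index.get(raw_label.lower(), default)
-- ===== Notes on version B (the rewrite author's own statement) =====
-- stated objective: alternative
-- what changed: B flattens the mapping into a (lowered source, target) pair list, builds a dict from the REVERSED pairs with plain overwriting assignment (so the first pair wins), and answers with one dict.get with a precomputed default, replacing A's per-entry scan that lowercases a list and early-returns.
import Mathlib
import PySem

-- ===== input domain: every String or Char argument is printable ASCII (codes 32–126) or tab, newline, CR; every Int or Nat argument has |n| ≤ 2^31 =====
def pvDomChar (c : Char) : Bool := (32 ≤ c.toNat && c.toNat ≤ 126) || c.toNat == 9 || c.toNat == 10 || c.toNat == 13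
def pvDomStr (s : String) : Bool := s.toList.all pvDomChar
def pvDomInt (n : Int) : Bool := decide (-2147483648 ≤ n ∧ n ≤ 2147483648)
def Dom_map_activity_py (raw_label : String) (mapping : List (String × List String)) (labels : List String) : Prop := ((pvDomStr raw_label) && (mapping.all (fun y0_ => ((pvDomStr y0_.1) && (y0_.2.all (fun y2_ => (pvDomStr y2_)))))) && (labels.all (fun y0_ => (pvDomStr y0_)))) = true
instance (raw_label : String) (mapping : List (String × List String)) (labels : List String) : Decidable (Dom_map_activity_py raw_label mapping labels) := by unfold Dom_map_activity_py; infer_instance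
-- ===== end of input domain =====

-- B flattens the mapping into (lowered source, target) pairs, builds a dict from the REVERSED
-- pairs by plain overwriting insert (so the first pair wins), and answers with one lookup with a
-- precomputed default, instead of A's per-entry scan lowercasing a list each time. (alternative)

-- ===== PORT A =====
-- the for-loop with early return: first target whose lowered source list contains normalized
def mapLoopA (normalized : String) : List (String × List String) → Option String
  | [] => none
  | (target_label, source_labels) :: rest =>
      if (source_labels.map PySem.Str.lower).contains normalized then some target_label
      else mapLoopA normalized rest

def map_activity_py (raw_label : String) (mapping : List (String × List String)) (labels : List String) : Option String :=
  let normalized := PySem.Str.lower raw_label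
  match mapLoopA normalized mapping with
  | some t => some t
  | none => if labels.contains "Other" then some "Other" else none

-- ===== PORT B =====
-- pairs = [(s.lower(), t) for t, srcs in mapping.items() for s in srcs]
def pairsB (mapping : List (String × List String)) : List (String × String) :=
  mapping.flatMap (fun p => p.2.map (fun s => (PySem.Str.lower s, p.1)))

-- index = dict(reversed(pairs))  -- later (= originally earlier) inserts overwrite
def indexB (mapping : List (String × List String)) : PySem.Dict String String :=
  (pairsB mapping).reverse.foldl (fun d p => d.insert p.1 p.2) PySem.Dict.empty

-- return index.get(raw_label.lower(), default)
def map_activity_py_alt (raw_label : String) (mapping : List (String × List String)) (labels : List String) : Option String :=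
  let default : Option String := if labels.contains "Other" then some "Other" else none
  match (indexB mapping).get? (PySem.Str.lower raw_label) with
  | some v => some v
  | none => default

-- ===== PRECONDITION & SPEC =====
def Spec_map_activity_py (raw_label : String) (mapping : List (String × List String)) (labels : List String) (out : Option String) : Prop := out = map_activity_py_alt raw_label mapping labels
instance (raw_label : String) (mapping : List (String × List String)) (labels : List String) (out : Option String) : Decidable (Spec_map_activity_py raw_label mapping labels out) := by unfold Spec_map_activity_py; infer_instance

-- ===== CLAIM (what is proved, stated in full; the proofs are below) =====
def Claim_equal_map_activity_py : Prop := ∀ (raw_label : String) (mapping : List (String × List String)) (labels : List String), Dom_map_activity_py raw_label mapping labels → Spec_map_activity_py raw_label mapping labels (map_activity_py raw_label mapping labels)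

-- ===== LEMMAS AND PROOFS =====

-- folding overwriting inserts: the LAST binding of k in l wins, i.e. the first in l.reverse
theorem get?_foldl_insert (k : String) (l : List (String × String)) (d : PySem.Dict String String) :
    (l.foldl (fun d p => d.insert p.1 p.2) d).get? k
      = ((l.reverse.lookup k).or (d.get? k)) := by
  induction l generalizing d with
  | nil => simp
  | cons p rest ih =>
      simp only [List.foldl_cons, ih, List.reverse_cons, List.lookup_append]
      by_cases h : k = p.1
      · subst h
        simp [PySem.Dict.get?_insert_self, List.lookup]
      · rw [PySem.Dict.get?_insert_of_ne d p.2 h]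
        have hb : (k == p.1) = false := by simp [h]
        simp [List.lookup, hb]

-- the flattened pair list's first match is exactly A's loop result
theorem lookup_pairsB (k : String) (mapping : List (String × List String)) :
    (pairsB mapping).lookup k = mapLoopA k mapping := by
  induction mapping with
  | nil => simp [pairsB, mapLoopA]
  | cons p rest ih =>
      rcases p with ⟨t, srcs⟩
      simp only [pairsB, List.flatMap_cons, List.lookup_append, mapLoopA] at *
      rw [ih]
      have hsingle : (srcs.map (fun s => (PySem.Str.lower s, t))).lookup k
          = (if (srcs.map PySem.Str.lower).contains k then some t else none) := by
        induction srcs with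
        | nil => simp
        | cons s ss ihs =>
            by_cases h : k = PySem.Str.lower s
            · simp [h]
            · have hb : (k == PySem.Str.lower s) = false := by simp [h]
              simp [List.lookup, hb, ihs, h]
      rw [hsingle]
      split <;> simp

theorem get?_indexB (k : String) (mapping : List (String × List String)) :
    (indexB mapping).get? k = mapLoopA k mapping := by
  simpa [indexB, get?_foldl_insert, lookup_pairsB] using
    get?_foldl_insert k (pairsB mapping).reverse PySem.Dict.empty

-- ===== VERDICT (by name: the statement is the Claim_ definition above) =====
theorem map_activity_py_spec : Claim_equal_map_activity_py := by
  intro raw_label mapping labels _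
  unfold Spec_map_activity_py map_activity_py map_activity_py_alt
  simp only [get?_indexB]
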